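-- pv_equiv track=rewrite | github.com/daniel-reich/ubiquitous-fiesta | LhAgbJ7nv3EDSLuYa_23.py | golomb
-- ===== SOURCE A (Python) =====
-- def golomb(n):
--   lst=[1,2,2]
--   if(n<=2):
--     return lst[0:n]
--   else:
--     i=2
--     while(len(lst)<=n and i<n):
--       j=i+1
--       x=lst[i]
--       lst.extend([j]*x)
--       i+=1
--     return lst[0:n]
-- ===== SOURCE B (Python) =====
-- def golomb(n):
--   if n <= 0:
--     return []
--   g = [0, 1]
--   for k in range(2, n + 1):
--     g.append(1 + g[k - g[g[k - 1]]])
--   return g[1:]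
-- ===== Notes on version B (the rewrite author's own statement) =====
-- stated objective: alternative
-- what changed: A builds the sequence by run-length extension (append value j repeated lst[i] times); B generates it term by term with the self-referential Golomb recurrence g(k) = 1 + g(k - g(g(k-1))).
-- intended difference: For n = -1 and n = -2 A returns [1, 2] resp. [1] (an accident of Python's negative-end slicing [1,2,2][0:n]); B returns [], the intended empty result for a nonpositive number of requested terms. — e.g. on golomb(-1): A returns [1, 2], B returns []
import Mathlib
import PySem

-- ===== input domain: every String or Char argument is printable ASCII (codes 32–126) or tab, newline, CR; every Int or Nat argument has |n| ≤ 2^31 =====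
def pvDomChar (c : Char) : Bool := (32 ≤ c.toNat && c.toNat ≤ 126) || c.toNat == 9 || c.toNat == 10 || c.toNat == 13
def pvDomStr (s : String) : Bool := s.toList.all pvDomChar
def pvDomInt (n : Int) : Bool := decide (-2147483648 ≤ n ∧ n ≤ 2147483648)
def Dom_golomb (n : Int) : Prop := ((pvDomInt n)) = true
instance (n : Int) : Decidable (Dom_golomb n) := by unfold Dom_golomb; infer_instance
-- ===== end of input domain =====

-- B replaces A's run-length extension loop by term-by-term generation with the
-- self-referential Golomb recurrence g(k) = 1 + g(k - g(g(k-1))); alternative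
-- decomposition, similar cost. No argument is mutated.

-- ===== PORT A =====
-- A's while loop; x = lst[i] would raise only when i is out of range, which never
-- happens at runtime (len(lst) > i is invariant), so pyGetD totalizes it exactly.
def golombLoop (n i : Int) (lst : List Int) : List Int :=
  if h : (lst.length : Int) ≤ n ∧ i < n then
    -- j = i + 1; x = lst[i]; lst.extend([j] * x); i += 1   ([j]*x is empty for x ≤ 0, as .toNat)
    golombLoop n (i + 1) (lst ++ List.replicate (PySem.List.pyGetD lst i 0).toNat (i + 1))
  else lst
termination_by (n - i).toNat
decreasing_by omega

def golomb (n : Int) : List Int :=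
  let lst : List Int := [1, 2, 2]
  if n ≤ 2 then PySem.List.slice lst (some 0) (some n)
  else PySem.List.slice (golombLoop n 2 lst) (some 0) (some n)

-- ===== PORT B =====
-- one loop step of B: g.append(1 + g[k - g[g[k - 1]]]); the three indexings are
-- always in range in Python (proved below), so pyGetD totalizes them exactly.
def golombAltStep (g : List Int) (k : Int) : List Int :=
  g ++ [1 + PySem.List.pyGetD g (k - PySem.List.pyGetD g (PySem.List.pyGetD g (k - 1) 0) 0) 0]

def golomb_alt (n : Int) : List Int :=
  if n ≤ 0 then []
  else
    let g := (PySem.List.pyRange 2 (n + 1) 1).foldl golombAltStep [0, 1]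
    PySem.List.slice g (some 1) none

-- ===== PRECONDITION & SPEC =====
-- For n = -1 and n = -2, A returns [1, 2] resp. [1] — an accident of Python's
-- negative-end slicing lst[0:n] on the seed list [1, 2, 2] — while B returns [],
-- the intended empty result for a nonpositive number of requested terms.
def D_golomb (n : Int) : Prop := n = -1 ∨ n = -2
instance (n : Int) : Decidable (D_golomb n) := by unfold D_golomb; infer_instance

def Spec_golomb (n : Int) (out : List Int) : Prop := ¬ D_golomb n → out = golomb_alt n
instance (n : Int) (out : List Int) : Decidable (Spec_golomb n out) := by unfold Spec_golomb; infer_instance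

def pvDiffWitness_golomb : Int := (-1)
def pvDiffWitnessOut_golomb : (List Int) × (List Int) := ([1, 2], [])

-- ===== CLAIM (what is proved, stated in full; the proofs are below) =====
def Claim_unchanged_golomb : Prop := ∀ (n : Int), Dom_golomb n → Spec_golomb n (golomb n)
def Claim_changed_golomb : Prop := Dom_golomb (pvDiffWitness_golomb) ∧ D_golomb (pvDiffWitness_golomb) ∧ golomb (pvDiffWitness_golomb) = pvDiffWitnessOut_golomb.1 ∧ golomb_alt (pvDiffWitness_golomb) = pvDiffWitnessOut_golomb.2 ∧ pvDiffWitnessOut_golomb.1 ≠ pvDiffWitnessOut_golomb.2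
def Claim_exact_golomb : Prop := ∀ (n : Int), Dom_golomb n → D_golomb n → golomb n ≠ golomb_alt n

-- ===== LEMMAS AND PROOFS =====

-- Nat-level model of A's construction: alist m is A's lst after m loop iterations,
-- gv k its k-th (1-based) entry, gS v the total length of the runs of values 1..v.
def alist : ℕ → List ℕ
  | 0 => [1, 2, 2]
  | m + 1 => alist m ++ List.replicate ((alist m).getD (m + 2) 0) (m + 3)

def gv (k : ℕ) : ℕ := (alist k).getD (k - 1) 0

def gS (v : ℕ) : ℕ := ∑ u ∈ Finset.range v, gv (u + 1)

lemma alist_pos : ∀ m, ∀ x ∈ alist m, 1 ≤ x := by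
  intro m
  induction m with
  | zero => intro x hx; simp [alist] at hx; omega
  | succ m ih =>
    intro x hx
    simp only [alist, List.mem_append, List.mem_replicate] at hx
    rcases hx with h | h
    · exact ih x h
    · omega

lemma alist_len : ∀ m, m + 3 ≤ (alist m).length := by
  intro m
  induction m with
  | zero => simp [alist]
  | succ m ih =>
    have hlt : m + 2 < (alist m).length := by omega
    have hmem : (alist m).getD (m + 2) 0 ∈ alist m := by
      rw [List.getD_eq_getElem _ _ hlt]; exact List.getElem_mem hlt
    have := alist_pos m _ hmem
    simp only [alist, List.length_append, List.length_replicate]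
    omega


lemma alist_stable : ∀ m m', m ≤ m' → ∀ j, j < (alist m).length →
    (alist m').getD j 0 = (alist m).getD j 0 := by
  intro m m' h
  induction m', h using Nat.le_induction with
  | base => intro j hj; rfl
  | succ m' hm ih =>
    intro j hj
    have hlen : (alist m).length ≤ (alist m').length := by
      clear ih hj j
      induction m', hm using Nat.le_induction with
      | base => exact le_refl _
      | succ k hk ihk => simp only [alist, List.length_append]; omega
    rw [alist, List.getD_append _ _ _ _ (by omega)]
    exact ih j hj

lemma alist_getD_eq_gv : ∀ m j, j < (alist m).length → (alist m).getD j 0 = gv (j + 1) := by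
  intro m j hj
  unfold gv
  simp only [Nat.add_sub_cancel]
  rcases le_total m (j + 1) with h | h
  · exact (alist_stable m (j+1) h j hj).symm
  · exact alist_stable (j+1) m h j (by have := alist_len (j+1); omega)

def rlist (w : ℕ) : List ℕ := (List.range w).flatMap (fun u => List.replicate (gv (u + 1)) (u + 1))

lemma gv_two : gv 2 = 2 := by decide

lemma alist_eq_rlist : ∀ m, alist m = rlist (m + 2) := by
  intro m
  induction m with
  | zero => decide
  | succ m ih =>
    have hlt : m + 2 < (alist m).length := by have := alist_len m; omega
    rw [alist, alist_getD_eq_gv m _ hlt, ih]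
    show _ = rlist (m + 2 + 1)
    rw [rlist, rlist, List.range_succ, List.flatMap_append]
    simp [List.range_succ]

lemma gS_succ : ∀ v, gS (v + 1) = gS v + gv (v + 1) := by
  intro v; rw [gS, gS, Finset.sum_range_succ]

lemma rlist_len : ∀ w, (rlist w).length = gS w := by
  intro w
  induction w with
  | zero => rfl
  | succ w ih =>
    rw [rlist, List.range_succ, List.flatMap_append, List.length_append, gS_succ]
    simp [rlist] at ih ⊢
    omega

lemma gv_pos : ∀ k, 1 ≤ k → 1 ≤ gv k := by
  intro k hk
  have hlt : k - 1 < (alist k).length := by have := alist_len k; omega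
  have : gv k ∈ alist k := by
    rw [gv, List.getD_eq_getElem _ _ hlt]; exact List.getElem_mem hlt
  exact alist_pos k _ this

lemma gS_lt : ∀ v w, v < w → gS v < gS w := by
  intro v w h
  induction w, h using Nat.le_induction with
  | base => have := gv_pos (v + 1) (by omega); rw [gS_succ]; omega
  | succ w hw ih => have := gv_pos (w + 1) (by omega); rw [gS_succ]; omega

lemma gS_le : ∀ v w, v ≤ w → gS v ≤ gS w := by
  intro v w h
  rcases eq_or_lt_of_le h with rfl | h
  · exact le_refl _
  · exact le_of_lt (gS_lt v w h)

lemma self_le_gS : ∀ v, v ≤ gS v := by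
  intro v
  induction v with
  | zero => exact Nat.zero_le _
  | succ v ih => have := gv_pos (v + 1) (by omega); rw [gS_succ]; omega

lemma run_char : ∀ w v j, v + 1 ≤ w → gS v ≤ j → j < gS (v + 1) → (rlist w).getD j 0 = v + 1 := by
  intro w
  induction w with
  | zero => intro v j h; omega
  | succ w ih =>
    intro v j hvw hj1 hj2
    rw [rlist, List.range_succ, List.flatMap_append]
    rcases Nat.lt_or_ge v w with hv | hv
    · have hjlen : j < (rlist w).length := by
        rw [rlist_len]; exact lt_of_lt_of_le hj2 (gS_le _ _ (by omega))
      rw [List.getD_append _ _ _ _ (by simpa [rlist] using hjlen)]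
      exact ih v j (by omega) hj1 hj2
    · have hvw' : v = w := by omega
      subst hvw'
      have hlen : ((List.range v).flatMap (fun u => List.replicate (gv (u + 1)) (u + 1))).length = gS v := by
        simpa [rlist] using rlist_len v
      rw [List.getD_append_right _ _ _ _ (by omega)]
      simp only [List.flatMap_cons, List.flatMap_nil, List.append_nil, hlen]
      rw [List.getD_eq_getElem _ _ (by simp; rw [gS_succ] at hj2; omega)]
      simp


lemma gv_char : ∀ k v, gS v < k → k ≤ gS (v + 1) → gv k = v + 1 := by
  intro k v h1 h2
  have hk1 : 1 ≤ k := by omega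
  have hv : v ≤ gS v := self_le_gS v
  have hlen : k - 1 < (alist k).length := by have := alist_len k; omega
  rw [gv, alist_eq_rlist]
  exact run_char (k + 2) v (k - 1) (by omega) (by omega) (by omega)

lemma gv_char' : ∀ k v, 1 ≤ v → gS (v - 1) < k → k ≤ gS v → gv k = v := by
  intro k v hv h1 h2
  have h := gv_char k (v - 1) h1 (by rwa [show v - 1 + 1 = v by omega])
  omega

lemma exists_run : ∀ k, 1 ≤ k → ∃ v, gS v < k ∧ k ≤ gS (v + 1) := by
  intro k hk
  induction k with
  | zero => omega
  | succ k ih =>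
    rcases Nat.eq_or_lt_of_le hk with h | h
    · refine ⟨0, by simp [gS], ?_⟩
      have := self_le_gS (0 + 1); omega
    · obtain ⟨v, h1, h2⟩ := ih (by omega)
      rcases Nat.lt_or_ge k (gS (v + 1)) with hc | hc
      · exact ⟨v, by omega, by omega⟩
      · refine ⟨v + 1, by omega, ?_⟩
        have e1 : gv (v + 1 + 1) = gv (v + 2) := rfl
        have e2 : gS (v + 1 + 1) = gS (v + 2) := rfl
        have := gv_pos (v + 2) (by omega)
        have h3 := gS_succ (v + 1)
        omega

lemma gv_char_inv : ∀ k v, 1 ≤ k → 1 ≤ v → gv k = v → gS (v - 1) < k ∧ k ≤ gS v := by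
  intro k v hk hv hgv
  obtain ⟨v', h1, h2⟩ := exists_run k hk
  have := gv_char k v' h1 h2
  have hev : v' = v - 1 := by omega
  subst hev
  refine ⟨h1, by rwa [show v - 1 + 1 = v by omega] at h2⟩

lemma gv_mono : ∀ k k', 1 ≤ k → k ≤ k' → gv k ≤ gv k' := by
  intro k k' hk hkk
  have h1 := gv_pos k hk
  have h2 := gv_pos k' (by omega)
  obtain ⟨a1, a2⟩ := gv_char_inv k (gv k) hk h1 rfl
  obtain ⟨b1, b2⟩ := gv_char_inv k' (gv k') (by omega) h2 rfl
  by_contra hlt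
  have := gS_le (gv k') (gv k - 1) (by omega)
  omega

lemma gv_step : ∀ k, 1 ≤ k → gv (k + 1) ≤ gv k + 1 := by
  intro k hk
  have h1 := gv_pos k hk
  have h2 := gv_pos (k + 1) (by omega)
  obtain ⟨a1, a2⟩ := gv_char_inv k (gv k) hk h1 rfl
  obtain ⟨b1, b2⟩ := gv_char_inv (k + 1) (gv (k + 1)) (by omega) h2 rfl
  by_contra hgt
  have hs1 := gS_le (gv k + 1) (gv (k + 1) - 1) (by omega)
  have hs2 := gS_succ (gv k)
  have := gv_pos (gv k + 1) (by omega)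
  omega

lemma gv_le_self : ∀ k, 1 ≤ k → gv k ≤ k := by
  intro k hk
  have h1 := gv_pos k hk
  obtain ⟨a1, a2⟩ := gv_char_inv k (gv k) hk h1 rfl
  have := self_le_gS (gv k - 1)
  omega

lemma gv_rec : ∀ k, 2 ≤ k → gv k = 1 + gv (k - gv (gv (k - 1))) := by
  intro k hk
  have hv2 : 2 ≤ gv k := gv_two ▸ gv_mono 2 k (by omega) hk
  set v := gv k with hv
  have hu1 : gv (k - 1) ≤ v := gv_mono (k - 1) k (by omega) (by omega)
  have hu2 : v ≤ gv (k - 1) + 1 := by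
    have h := gv_step (k - 1) (by omega)
    rwa [show k - 1 + 1 = k by omega] at h
  obtain ⟨c1, c2⟩ := gv_char_inv k v (by omega) (by omega) rfl
  have hSv1 : gS (v - 1) = gS (v - 2) + gv (v - 1) := by
    have h := gS_succ (v - 2)
    rwa [show v - 2 + 1 = v - 1 by omega] at h
  have hSv : gS v = gS (v - 1) + gv v := by
    have h := gS_succ (v - 1)
    rwa [show v - 1 + 1 = v by omega] at h
  have hgvv1 : 1 ≤ gv (v - 1) := gv_pos (v - 1) (by omega)
  have hgvv : 1 ≤ gv v := gv_pos v (by omega)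
  have hee : gS (v - 1 - 1) = gS (v - 2) := by rw [show v - 1 - 1 = v - 2 by omega]
  rcases Nat.eq_or_lt_of_le hu1 with hcase | hcase
  · -- gv (k-1) = v : k is not the first position of the run of v
    rw [hcase]
    obtain ⟨d1, d2⟩ := gv_char_inv (k - 1) v (by omega) (by omega) hcase
    have hstep : gv v ≤ gv (v - 1) + 1 := by
      have h := gv_step (v - 1) (by omega)
      rwa [show v - 1 + 1 = v by omega] at h
    have := gv_char' (k - gv v) (v - 1) (by omega) (by omega) (by omega)
    omega
  · -- gv (k-1) = v - 1 : k is the first position of the run of v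
    have hcase' : gv (k - 1) = v - 1 := by omega
    rw [hcase']
    obtain ⟨d1, d2⟩ := gv_char_inv (k - 1) (v - 1) (by omega) (by omega) hcase'
    have hkeq : k = gS (v - 1) + 1 := by omega
    have := gv_char' (k - gv (v - 1)) (v - 1) (by omega) (by omega) (by omega)
    omega

def natsToInts (l : List ℕ) : List Int := l.map (fun x : ℕ => (x : Int))

lemma natsToInts_getD (l : List ℕ) (j : ℕ) (hj : j < l.length) :
    PySem.List.pyGetD (natsToInts l) ((j : ℕ) : Int) 0 = ((l.getD j 0 : ℕ) : Int) := by
  rw [PySem.List.pyGetD_natCast]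
  have hj' : j < (natsToInts l).length := by simpa [natsToInts] using hj
  rw [List.getD_eq_getElem _ _ hj', List.getD_eq_getElem _ _ hj]
  simp [natsToInts]

lemma loop_alist (n : Int) : ∀ f m, (n - (m + 2 : ℕ)).toNat ≤ f → 3 ≤ n →
    ∃ M, golombLoop n ((m + 2 : ℕ) : Int) (natsToInts (alist m)) = natsToInts (alist M) ∧
      n ≤ ((alist M).length : Int) := by
  intro f
  induction f with
  | zero =>
    intro m hf h3
    have hlen := alist_len m
    refine ⟨m, ?_, by omega⟩
    rw [golombLoop]
    rw [dif_neg (by simp only [natsToInts, List.length_map]; push_cast; omega)]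
  | succ f ih =>
    intro m hf h3
    have hlen := alist_len m
    by_cases hc : ((natsToInts (alist m)).length : Int) ≤ n ∧ ((m + 2 : ℕ) : Int) < n
    · rw [golombLoop, dif_pos hc]
      have hidx : m + 2 < (alist m).length := by omega
      have hx : PySem.List.pyGetD (natsToInts (alist m)) ((m + 2 : ℕ) : Int) 0
          = ((gv (m + 3) : ℕ) : Int) := by
        rw [natsToInts_getD _ _ hidx, alist_getD_eq_gv m _ hidx]
      have hsplit : alist (m + 1) = alist m ++ List.replicate (gv (m + 3)) (m + 3) := by
        rw [alist, alist_getD_eq_gv m _ hidx]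
      have harg : natsToInts (alist m) ++
            List.replicate (PySem.List.pyGetD (natsToInts (alist m)) ((m + 2 : ℕ) : Int) 0).toNat
              (((m + 2 : ℕ) : Int) + 1)
          = natsToInts (alist (m + 1)) := by
        rw [hx, hsplit]
        simp only [natsToInts, List.map_append, List.map_replicate, Int.toNat_natCast]
        congr 2
      rw [harg]
      have : (((m + 2 : ℕ) : Int) + 1) = ((m + 1 + 2 : ℕ) : Int) := by push_cast; ring
      rw [this]
      apply ih (m + 1) _ h3
      have h2n : ((m + 2 : ℕ) : Int) < n := hc.2
      push_cast at h2n hf ⊢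
      omega
    · refine ⟨m, ?_, ?_⟩
      · rw [golombLoop, dif_neg hc]
      · simp only [natsToInts, List.length_map] at hc
        push_cast at hc ⊢
        omega

lemma golomb_char (n : Int) (h : 3 ≤ n) :
    golomb n = (List.range n.toNat).map (fun t => (gv (t + 1) : Int)) := by
  have hbase : ([1, 2, 2] : List Int) = natsToInts (alist 0) := by decide
  have h2 : (2 : Int) = ((0 + 2 : ℕ) : Int) := by norm_num
  obtain ⟨M, hM, hMlen⟩ := loop_alist n (n.toNat) 0 (by omega) h
  rw [golomb]
  simp only [if_neg (by omega : ¬ n ≤ 2)]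
  rw [hbase, h2, hM]
  rw [PySem.List.slice_zero_start, PySem.List.slice_to _ (by omega : (0:Int) ≤ n)]
  rw [natsToInts, ← List.map_take]
  have htake : (alist M).take n.toNat = (List.range n.toNat).map (fun t => gv (t + 1)) := by
    apply List.ext_getElem
    · simp; omega
    · intro t h1 h2
      simp only [List.getElem_take, List.getElem_map, List.getElem_range]
      have ht : t < (alist M).length := by simp at h1; omega
      rw [← alist_getD_eq_gv M t ht, List.getD_eq_getElem _ _ ht]
  rw [htake, List.map_map]
  rfl

-- B side
def gl (m : ℕ) : List ℕ := 0 :: (List.range m).map (fun t => gv (t + 1))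

lemma gl_len (m : ℕ) : (gl m).length = m + 1 := by simp [gl]

lemma gl_getD (m j : ℕ) (h1 : 1 ≤ j) (h2 : j ≤ m) : (gl m).getD j 0 = gv j := by
  rw [gl]
  cases j with
  | zero => omega
  | succ j =>
    rw [List.getD_cons_succ]
    rw [List.getD_eq_getElem _ _ (by simpa using h2)]
    simp

lemma gl_succ (m : ℕ) : gl (m + 1) = gl m ++ [gv (m + 1)] := by
  rw [gl, gl, List.range_succ, List.map_append]
  rfl

lemma alt_step (m : ℕ) (hm : 1 ≤ m) :
    golombAltStep (natsToInts (gl m)) ((m + 1 : ℕ) : Int) = natsToInts (gl (m + 1)) := by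
  have hgvm : 1 ≤ gv m := gv_pos m hm
  have hgvle : gv m ≤ m := gv_le_self m hm
  have hgg1 : 1 ≤ gv (gv m) := gv_pos _ hgvm
  have hggle : gv (gv m) ≤ m := le_trans (gv_le_self _ hgvm) hgvle
  have e1 : ((m + 1 : ℕ) : Int) - 1 = ((m : ℕ) : Int) := by push_cast; ring
  have g1 : PySem.List.pyGetD (natsToInts (gl m)) ((m : ℕ) : Int) 0 = ((gv m : ℕ) : Int) := by
    rw [natsToInts_getD _ _ (by rw [gl_len]; omega), gl_getD m m hm (le_refl m)]
  have g2 : PySem.List.pyGetD (natsToInts (gl m)) ((gv m : ℕ) : Int) 0 = ((gv (gv m) : ℕ) : Int) := by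
    rw [natsToInts_getD _ _ (by rw [gl_len]; omega), gl_getD m (gv m) hgvm hgvle]
  have e2 : ((m + 1 : ℕ) : Int) - ((gv (gv m) : ℕ) : Int) = ((m + 1 - gv (gv m) : ℕ) : Int) := by
    push_cast [Nat.cast_sub (by omega : gv (gv m) ≤ m + 1)]; ring
  have g3 : PySem.List.pyGetD (natsToInts (gl m)) ((m + 1 - gv (gv m) : ℕ) : Int) 0
      = ((gv (m + 1 - gv (gv m)) : ℕ) : Int) := by
    rw [natsToInts_getD _ _ (by rw [gl_len]; omega), gl_getD m _ (by omega) (by omega)]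
  have hrec : gv (m + 1) = 1 + gv (m + 1 - gv (gv m)) := by
    have h := gv_rec (m + 1) (by omega)
    rwa [show m + 1 - 1 = m by omega] at h
  rw [golombAltStep, e1, g1, g2, e2, g3]
  have : (1 : Int) + ((gv (m + 1 - gv (gv m)) : ℕ) : Int) = ((gv (m + 1) : ℕ) : Int) := by
    rw [hrec]; push_cast; ring
  rw [this, gl_succ]
  simp [natsToInts]

lemma alt_fold (r : ℕ) :
    (((List.range r).map (fun k : ℕ => (2 : Int) + (k : Int))).foldl golombAltStep (natsToInts (gl 1)))
      = natsToInts (gl (r + 1)) := by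
  induction r with
  | zero => rfl
  | succ r ih =>
    rw [List.range_succ, List.map_append, List.foldl_append, ih]
    simp only [List.map_cons, List.map_nil, List.foldl_cons, List.foldl_nil]
    have e : (2 : Int) + (r : ℕ) = ((r + 1 + 1 : ℕ) : Int) := by push_cast; ring
    rw [e, alt_step (r + 1) (by omega), gl_succ]

lemma golomb_alt_char (n : Int) (h : 1 ≤ n) :
    golomb_alt n = (List.range n.toNat).map (fun t => (gv (t + 1) : Int)) := by
  rw [golomb_alt]
  simp only [if_neg (by omega : ¬ n ≤ 0)]
  rw [PySem.List.pyRange_one]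
  have h01 : ([0, 1] : List Int) = natsToInts (gl 1) := by decide
  have hr : (n + 1 - 2).toNat + 1 = n.toNat := by omega
  rw [h01, alt_fold ((n + 1 - 2).toNat), hr]
  rw [PySem.List.slice_from_one]
  rw [gl, natsToInts, List.map_cons, List.tail_cons, List.map_map]
  rfl

-- ===== VERDICT (by name: the statement is the Claim_ definition above) =====
theorem golomb_spec : Claim_unchanged_golomb := by
  intro n _ hD
  by_cases h3 : 3 ≤ n
  · rw [golomb_char n h3, golomb_alt_char n (by omega)]
  · by_cases h0 : 0 ≤ n
    · interval_cases n <;> decide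
    · have hn3 : n ≤ -3 := by
        unfold D_golomb at hD
        omega
      have hk : n = -(((-n).toNat : ℕ) : Int) := by omega
      have hk3 : 3 ≤ (-n).toNat := by omega
      rw [golomb, golomb_alt, if_pos (by omega : n ≤ 2), if_pos (by omega : n ≤ 0)]
      rw [hk, PySem.List.slice_zero_start,
        PySem.List.slice_to_neg_natCast _ _ (by omega : 0 < (-n).toNat)]
      rw [show ([1, 2, 2] : List Int).length - (-n).toNat = 0 by simp; omega]
      rfl

theorem golomb_changed : Claim_changed_golomb := by unfold Claim_changed_golomb; decide

theorem golomb_tight : Claim_exact_golomb := by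
  intro n _ hD
  unfold D_golomb at hD
  rcases hD with rfl | rfl <;> decide
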